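-- pv_equiv track=rewrite | github.com/bmchtech/GameBeanAdvance | src/cpp-jump/cpp_jump_compiler.py | is_compatible_bits
-- ===== SOURCE A (Python) =====
-- def get_nth_bit(value, n):
--     return (value >> n) & 1
--
-- def is_compatible_bits(include, index):
--     for k in range(len(include)):
--         i = include[k]
--         j = str(get_nth_bit(index, k))
--         if not ((i == '0' and j == '0') or \
--                 (i == '1' and j == '1') or \
--                 (i == '-')):
--            return False
--     return True
-- ===== SOURCE B (Python) =====
-- def is_compatible_bits(include, index):
--     ones = 0
--     zeros = 0
--     for k, ch in enumerate(include):
--         if ch == '1':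
--             ones |= 1 << k
--         elif ch == '0':
--             zeros |= 1 << k
--         elif ch != '-':
--             return False
--     return (index & ones) == ones and (index & zeros) == 0
-- ===== Notes on version B (the rewrite author's own statement) =====
-- stated objective: alternative
-- what changed: B replaces A's per-character bit extraction (shift, mask, int-to-string, string compare for every position) by accumulating two integer bitmasks (required-one bits and required-zero bits) in one pass and deciding compatibility with two final bitwise-AND tests.
import Mathlib
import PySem

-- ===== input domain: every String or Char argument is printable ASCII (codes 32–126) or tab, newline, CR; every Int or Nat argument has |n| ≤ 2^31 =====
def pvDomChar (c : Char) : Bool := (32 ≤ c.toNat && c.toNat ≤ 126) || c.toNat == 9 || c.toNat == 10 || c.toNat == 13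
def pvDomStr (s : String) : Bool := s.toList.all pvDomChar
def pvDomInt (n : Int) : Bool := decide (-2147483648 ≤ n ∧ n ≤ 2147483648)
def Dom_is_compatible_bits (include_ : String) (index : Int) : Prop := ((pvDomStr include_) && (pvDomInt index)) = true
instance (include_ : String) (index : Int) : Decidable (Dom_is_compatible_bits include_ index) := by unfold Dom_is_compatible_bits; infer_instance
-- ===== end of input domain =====

-- B replaces A's per-character bit extraction (shift/mask/str/compare each position) by two
-- accumulated bitmasks tested once at the end; alternative structure, same O(n) cost.

-- ===== PORT A =====
def get_nth_bit (value : Int) (n : Nat) : Int := PySem.Int.band (value >>> n) 1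

def pvGoA (cs : List Char) (index : Int) (k : Nat) : Bool :=
  match cs with
  | [] => true
  | c :: rest =>
    let j := PySem.Int.toStr (get_nth_bit index k)
    if (c == '0' && j == "0") || (c == '1' && j == "1") || (c == '-') then
      pvGoA rest index (k + 1)
    else false

def is_compatible_bits (include_ : String) (index : Int) : Bool :=
  pvGoA include_.toList index 0

-- ===== PORT B =====
-- loop of Source B: build the two masks; none = early `return False` on an invalid character
def pvGoB (cs : List Char) (k : Nat) (ones zeros : Int) : Option (Int × Int) :=
  match cs with
  | [] => some (ones, zeros)
  | c :: rest =>
    if c == '1' then pvGoB rest (k + 1) (PySem.Int.bor ones ((1 : Int) <<< k)) zeros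
    else if c == '0' then pvGoB rest (k + 1) ones (PySem.Int.bor zeros ((1 : Int) <<< k))
    else if c == '-' then pvGoB rest (k + 1) ones zeros
    else none

def is_compatible_bits_alt (include_ : String) (index : Int) : Bool :=
  match pvGoB include_.toList 0 0 0 with
  | none => false
  | some (ones, zeros) =>
    (PySem.Int.band index ones == ones) && (PySem.Int.band index zeros == 0)

-- ===== PRECONDITION & SPEC =====
def Spec_is_compatible_bits (include_ : String) (index : Int) (out : Bool) : Prop := out = is_compatible_bits_alt include_ index
instance (include_ : String) (index : Int) (out : Bool) : Decidable (Spec_is_compatible_bits include_ index out) := by unfold Spec_is_compatible_bits; infer_instance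

-- ===== CLAIM (what is proved, stated in full; the proofs are below) =====
def Claim_equal_is_compatible_bits : Prop := ∀ (include_ : String) (index : Int), Dom_is_compatible_bits include_ index → Spec_is_compatible_bits include_ index (is_compatible_bits include_ index)

-- ===== LEMMAS AND PROOFS =====

-- two's-complement bit k of an integer
def pvTb (x : Int) (j : Nat) : Bool :=
  match x with
  | .ofNat t => t.testBit j
  | .negSucc m => !(m.testBit j)

theorem pvNatAndEqSelf (t n : Nat) :
    t &&& n = n ↔ ∀ j, n.testBit j = true → t.testBit j = true := by
  constructor
  · intro h j hj
    have := congrArg (Nat.testBit · j) h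
    simp only [Nat.testBit_and, hj, Bool.and_true] at this
    exact this
  · intro h
    apply Nat.eq_of_testBit_eq
    intro j
    rw [Nat.testBit_and]
    cases hj : n.testBit j
    · simp
    · simp [h j hj]

theorem pvNatAndEqZero (t n : Nat) :
    t &&& n = 0 ↔ ∀ j, n.testBit j = true → t.testBit j = false := by
  constructor
  · intro h j hj
    have := congrArg (Nat.testBit · j) h
    simp only [Nat.testBit_and, hj, Bool.and_true, Nat.zero_testBit] at this
    exact this
  · intro h
    apply Nat.eq_of_testBit_eq
    intro j
    rw [Nat.testBit_and, Nat.zero_testBit]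
    cases hj : n.testBit j
    · simp
    · simp [h j hj]

theorem pvBandNegSucc (m n : Nat) :
    PySem.Int.band (Int.negSucc m) (n : Int) = ((n - (n &&& m) : Nat) : Int) := by
  have h1 : ¬ (0 : Int) ≤ Int.negSucc m := by omega
  have h2 : (-(Int.negSucc m) - 1).toNat = m := by
    simp [Int.negSucc_eq]
  simp [PySem.Int.band, h1, h2]

-- band x ↑n = ↑n  ⟺  every bit of n is set in x
theorem pvBandEqSelf (x : Int) (n : Nat) :
    PySem.Int.band x (n : Int) = (n : Int) ↔ ∀ j, n.testBit j = true → pvTb x j = true := by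
  cases x with
  | ofNat t =>
    rw [show ((Int.ofNat t) : Int) = ((t : Nat) : Int) from rfl, PySem.Int.band_natCast]
    rw [Int.natCast_inj]
    simpa [pvTb] using pvNatAndEqSelf t n
  | negSucc m =>
    rw [pvBandNegSucc, Int.natCast_inj]
    have hle : n &&& m ≤ n := Nat.and_le_left
    constructor
    · intro h j hj
      have hz : n &&& m = 0 := by omega
      simp only [pvTb]
      have := (pvNatAndEqZero m n).mp (by rw [Nat.and_comm]; exact hz) j hj
      simp [this]
    · intro h
      have hz : n &&& m = 0 := by
        rw [Nat.and_comm]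
        exact (pvNatAndEqZero m n).mpr (fun j hj => by
          have := h j hj
          simpa [pvTb] using this)
      omega

-- band x ↑n = 0  ⟺  every bit of n is clear in x
theorem pvBandEqZero (x : Int) (n : Nat) :
    PySem.Int.band x (n : Int) = 0 ↔ ∀ j, n.testBit j = true → pvTb x j = false := by
  cases x with
  | ofNat t =>
    rw [show ((Int.ofNat t) : Int) = ((t : Nat) : Int) from rfl, PySem.Int.band_natCast]
    rw [show (0 : Int) = ((0 : Nat) : Int) from rfl, Int.natCast_inj]
    simpa [pvTb] using pvNatAndEqZero t n
  | negSucc m =>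
    rw [pvBandNegSucc, show (0 : Int) = ((0 : Nat) : Int) from rfl, Int.natCast_inj]
    have hle : n &&& m ≤ n := Nat.and_le_left
    have hle2 : n &&& m ≤ m := Nat.and_le_right
    constructor
    · intro h j hj
      have heq : n &&& m = n := by omega
      simp only [pvTb, Bool.not_eq_false']
      exact (pvNatAndEqSelf m n).mp (by rw [Nat.and_comm]; exact heq) j hj
    · intro h
      have heq : n &&& m = n := by
        rw [Nat.and_comm]
        exact (pvNatAndEqSelf m n).mpr (fun j hj => by
          have := h j hj
          simpa [pvTb] using this)
      omega

theorem pvGetBit (x : Int) (k : Nat) :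
    PySem.Int.band (x >>> k) 1 = (if pvTb x k then 1 else 0) := by
  cases x with
  | ofNat t =>
    rw [show (Int.ofNat t) >>> k = ((t >>> k : Nat) : Int) from rfl,
        show (1 : Int) = ((1 : Nat) : Int) from rfl, PySem.Int.band_natCast]
    simp only [pvTb, Nat.and_one_is_mod, Nat.shiftRight_eq_div_pow,
      Nat.testBit_eq_decide_div_mod_eq]
    have : t / 2 ^ k % 2 = 0 ∨ t / 2 ^ k % 2 = 1 := by omega
    rcases this with h | h <;> simp [h]
  | negSucc m =>
    rw [show (Int.negSucc m) >>> k = Int.negSucc (m >>> k) from rfl,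
        show (1 : Int) = ((1 : Nat) : Int) from rfl, pvBandNegSucc]
    simp only [pvTb, Nat.one_and_eq_mod_two, Nat.shiftRight_eq_div_pow,
      Nat.testBit_eq_decide_div_mod_eq]
    have : m / 2 ^ k % 2 = 0 ∨ m / 2 ^ k % 2 = 1 := by omega
    rcases this with h | h <;> simp [h]

theorem pvJOne (x : Int) (k : Nat) :
    (PySem.Int.toStr (get_nth_bit x k) == "1") = pvTb x k := by
  rw [get_nth_bit, pvGetBit]
  cases h : pvTb x k <;> simp <;> decide

theorem pvJZero (x : Int) (k : Nat) :
    (PySem.Int.toStr (get_nth_bit x k) == "0") = !(pvTb x k) := by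
  rw [get_nth_bit, pvGetBit]
  cases h : pvTb x k <;> simp <;> decide

theorem pvOneShift (k : Nat) : ((1 : Int) <<< k) = ((2 ^ k : Nat) : Int) := by
  rw [show (1 : Int) = ((1 : Nat) : Int) from rfl,
      show ((1 : Nat) : Int) <<< k = ((1 <<< k : Nat) : Int) from rfl]
  norm_num [Nat.shiftLeft_eq]

-- splitting an OR-ed-in power of two out of the two mask tests
theorem pvSplitSelf (x : Int) (a k : Nat) :
    PySem.Int.band x ((a ||| 2 ^ k : Nat) : Int) = ((a ||| 2 ^ k : Nat) : Int)
      ↔ (pvTb x k = true ∧ PySem.Int.band x (a : Int) = (a : Int)) := by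
  rw [pvBandEqSelf, pvBandEqSelf]
  constructor
  · intro h
    exact ⟨h k (by simp [Nat.testBit_or, Nat.testBit_two_pow_self]),
           fun j hj => h j (by simp [Nat.testBit_or, hj])⟩
  · rintro ⟨h1, h2⟩ j hj
    rw [Nat.testBit_or] at hj
    rcases Bool.or_eq_true_iff.mp hj with hj | hj
    · exact h2 j hj
    · by_cases hkj : k = j
      · exact hkj ▸ h1
      · rw [Nat.testBit_two_pow_of_ne hkj] at hj; exact absurd hj (by simp)

theorem pvSplitZero (x : Int) (a k : Nat) :
    PySem.Int.band x ((a ||| 2 ^ k : Nat) : Int) = 0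
      ↔ (pvTb x k = false ∧ PySem.Int.band x (a : Int) = 0) := by
  rw [pvBandEqZero, pvBandEqZero]
  constructor
  · intro h
    exact ⟨h k (by simp [Nat.testBit_or, Nat.testBit_two_pow_self]),
           fun j hj => h j (by simp [Nat.testBit_or, hj])⟩
  · rintro ⟨h1, h2⟩ j hj
    rw [Nat.testBit_or] at hj
    rcases Bool.or_eq_true_iff.mp hj with hj | hj
    · exact h2 j hj
    · by_cases hkj : k = j
      · exact hkj ▸ h1
      · rw [Nat.testBit_two_pow_of_ne hkj] at hj; exact absurd hj (by simp)

-- main loop invariant: B's mask loop + final test vs A's per-character loop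
theorem pvLoopEq (cs : List Char) (index : Int) :
    ∀ (k a b : Nat),
      (match pvGoB cs k (a : Int) (b : Int) with
       | none => false
       | some (o, z) => (PySem.Int.band index o == o) && (PySem.Int.band index z == 0))
      = (pvGoA cs index k && (PySem.Int.band index (a : Int) == (a : Int))
          && (PySem.Int.band index (b : Int) == 0)) := by
  induction cs with
  | nil =>
    intro k a b
    simp [pvGoB, pvGoA]
  | cons c rest ih =>
    intro k a b
    by_cases h1 : c = '1'
    · subst h1
      rw [pvGoB, if_pos (by decide), pvOneShift, PySem.Int.bor_natCast, ih (k+1) (a ||| 2^k) b]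
      rw [pvGoA]
      simp only [pvJOne]
      rw [show (('1' == '0') = false) from rfl, show (('1' == '1') = true) from rfl,
          show (('1' == '-') = false) from rfl]
      cases htb : pvTb index k
      · have : (PySem.Int.band index ((a ||| 2 ^ k : Nat) : Int) == ((a ||| 2 ^ k : Nat) : Int)) = false := by
          rw [beq_eq_false_iff_ne]
          intro heq
          have := ((pvSplitSelf index a k).mp heq).1
          rw [htb] at this; exact absurd this (by simp)
        simp [this]
      · have : (PySem.Int.band index ((a ||| 2 ^ k : Nat) : Int) == ((a ||| 2 ^ k : Nat) : Int))
            = (PySem.Int.band index (a : Int) == (a : Int)) := by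
          rw [Bool.eq_iff_iff, beq_iff_eq, beq_iff_eq, pvSplitSelf]
          simp [htb]
        rw [this]
        cases pvGoA rest index (k+1) <;> cases hx : (PySem.Int.band index (a : Int) == (a : Int)) <;> simp
    · by_cases h0 : c = '0'
      · subst h0
        rw [pvGoB, if_neg (by decide), if_pos (by decide), pvOneShift, PySem.Int.bor_natCast,
            ih (k+1) a (b ||| 2^k)]
        rw [pvGoA]
        simp only [pvJZero]
        rw [show (('0' == '0') = true) from rfl, show (('0' == '1') = false) from rfl,
            show (('0' == '-') = false) from rfl]
        cases htb : pvTb index k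
        · have : (PySem.Int.band index ((b ||| 2 ^ k : Nat) : Int) == 0)
              = (PySem.Int.band index (b : Int) == 0) := by
            rw [Bool.eq_iff_iff, beq_iff_eq, beq_iff_eq, pvSplitZero]
            simp [htb]
          rw [this]
          cases pvGoA rest index (k+1) <;> cases hx : (PySem.Int.band index (b : Int) == 0) <;> simp
        · have : (PySem.Int.band index ((b ||| 2 ^ k : Nat) : Int) == 0) = false := by
            rw [beq_eq_false_iff_ne]
            intro heq
            have := ((pvSplitZero index b k).mp heq).1
            rw [htb] at this; exact absurd this (by simp)
          simp [this]
      · by_cases hd : c = '-'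
        · subst hd
          rw [pvGoB, if_neg (by decide), if_neg (by decide), if_pos (by decide), ih (k+1) a b]
          rw [pvGoA]
          rw [show (('-' == '-') = true) from rfl]
          simp
        · rw [pvGoB, if_neg (by simpa using h1), if_neg (by simpa using h0),
              if_neg (by simpa using hd)]
          rw [pvGoA]
          have hc0 : (c == '0') = false := by simpa using h0
          have hc1 : (c == '1') = false := by simpa using h1
          have hcd : (c == '-') = false := by simpa using hd
          simp [hc0, hc1, hcd]

-- ===== VERDICT (by name: the statement is the Claim_ definition above) =====
theorem is_compatible_bits_spec : Claim_equal_is_compatible_bits := by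
  intro include_ index _
  unfold Spec_is_compatible_bits is_compatible_bits is_compatible_bits_alt
  have := pvLoopEq include_.toList index 0 0 0
  simp only [Nat.cast_zero] at this
  rw [this]
  simp [PySem.Int.band_zero]
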